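-- pv_equiv track=rewrite | github.com/asunder123/UnitTest | pythonunitvalid.py | parse_user_code
-- ===== SOURCE A (Python) =====
-- def parse_user_code(user_code):
--     # Extract function/method definitions from user's code
--     functions = []
--     lines = user_code.split('\n')
--     current_function = ''
--     for line in lines:
--         if line.strip().startswith("def "):
--             if current_function:
--                 functions.append(current_function)
--             current_function = line
--         elif current_function:
--             current_function += '\n' + line
--     if current_function:
--         functions.append(current_function)
--     return functions
-- ===== SOURCE B (Python) =====
-- def parse_user_code(user_code):
--     # Index-then-slice: find def-line indices, then cut blocks between consecutive indices
--     lines = user_code.split('\n')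
--     starts = [i for i, line in enumerate(lines) if line.strip().startswith("def ")]
--     ends = starts[1:] + [len(lines)]
--     return ['\n'.join(lines[a:b]) for a, b in zip(starts, ends)]
-- ===== Notes on version B (the rewrite author's own statement) =====
-- stated objective: alternative
-- what changed: Replaced A's single accumulating scan (growing a current-block string line by line) with a two-phase index-then-slice pass: first collect the indices of def-lines, then cut each block as a slice between consecutive def-indices and join it once.
import Mathlib
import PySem

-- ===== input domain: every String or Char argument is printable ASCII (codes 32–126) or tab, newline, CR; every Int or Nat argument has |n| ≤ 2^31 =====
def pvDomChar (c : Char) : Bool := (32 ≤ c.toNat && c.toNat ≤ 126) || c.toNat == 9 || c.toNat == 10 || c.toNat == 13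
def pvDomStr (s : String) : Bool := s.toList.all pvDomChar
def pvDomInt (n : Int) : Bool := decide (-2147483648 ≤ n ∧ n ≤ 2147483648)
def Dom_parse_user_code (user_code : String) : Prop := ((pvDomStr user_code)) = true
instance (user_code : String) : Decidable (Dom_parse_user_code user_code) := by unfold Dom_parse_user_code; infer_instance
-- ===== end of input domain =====

-- B replaces A's single accumulating scan by an index-then-slice two-phase pass (objective: alternative decomposition, same cost).

-- shared predicate: line.strip().startswith("def ")
def pvIsDef (line : String) : Bool := PySem.Str.startswith (PySem.Str.strip line) "def "

-- ===== PORT A =====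
def parse_user_code (user_code : String) : List String :=
  let lines := (PySem.Str.split? user_code "\n").getD []
  let r := lines.foldl (fun (st : List String × String) line =>
      if pvIsDef line then
        ((if st.2 ≠ "" then st.1 ++ [st.2] else st.1), line)
      else if st.2 ≠ "" then (st.1, st.2 ++ "\n" ++ line)
      else st) ([], "")
  if r.2 ≠ "" then r.1 ++ [r.2] else r.1

-- ===== PORT B =====
def parse_user_code_alt (user_code : String) : List String :=
  let lines := (PySem.Str.split? user_code "\n").getD []
  let starts := (PySem.List.enumerate lines 0).filterMap
      (fun p => if pvIsDef p.2 then some p.1 else none)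
  let ends := PySem.List.slice starts (some 1) none ++ [(lines.length : Int)]
  (starts.zip ends).map (fun p => PySem.Str.join "\n" (PySem.List.slice lines (some p.1) (some p.2)))

-- ===== PRECONDITION & SPEC =====
def Spec_parse_user_code (user_code : String) (out : List String) : Prop := out = parse_user_code_alt user_code
instance (user_code : String) (out : List String) : Decidable (Spec_parse_user_code user_code out) := by unfold Spec_parse_user_code; infer_instance

-- ===== CLAIM (what is proved, stated in full; the proofs are below) =====
def Claim_equal_parse_user_code : Prop := ∀ (user_code : String), Dom_parse_user_code user_code → Spec_parse_user_code user_code (parse_user_code user_code)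

-- ===== LEMMAS AND PROOFS =====

-- A's loop step and final flush, as named functions
def pvAStep (st : List String × String) (line : String) : List String × String :=
  if pvIsDef line then
    ((if st.2 ≠ "" then st.1 ++ [st.2] else st.1), line)
  else if st.2 ≠ "" then (st.1, st.2 ++ "\n" ++ line)
  else st

def pvAFin (st : List String × String) : List String :=
  if st.2 ≠ "" then st.1 ++ [st.2] else st.1

def pvAcore (lines : List String) : List String :=
  pvAFin (lines.foldl pvAStep ([], ""))

-- B's index list, with running offset
def pvBstarts (s : Int) (lines : List String) : List Int :=
  (PySem.List.enumerate lines s).filterMap (fun p => if pvIsDef p.2 then some p.1 else none)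

def pvBcAux (full : List String) (ps : List (Int × Int)) : List String :=
  ps.map (fun p => PySem.Str.join "\n" (PySem.List.slice full (some p.1) (some p.2)))

def pvBc (lines : List String) : List String :=
  pvBcAux lines ((pvBstarts 0 lines).zip
    (PySem.List.slice (pvBstarts 0 lines) (some 1) none ++ [(lines.length : Int)]))

-- reference recursion: the blocks, one per def-line
def pvBlocks : List String → List String
  | [] => []
  | l :: ls =>
    if pvIsDef l then
      PySem.Str.join "\n" (l :: ls.takeWhile (fun x => !pvIsDef x)) ::
        pvBlocks (ls.dropWhile (fun x => !pvIsDef x))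
    else pvBlocks ls
termination_by ls => ls.length
decreasing_by
  · exact Nat.lt_succ_of_le (List.length_dropWhile_le _ _)
  · exact Nat.lt_succ_self _

theorem pvIsDef_empty : pvIsDef "" = false := by decide

theorem pv_ne_empty_of_isDef {l : String} (h : pvIsDef l = true) : l ≠ "" := by
  intro he; rw [he, pvIsDef_empty] at h; cases h

theorem pv_concat_ne_empty (a b : String) : a ++ "\n" ++ b ≠ "" := by
  intro h
  have := congrArg String.toList h
  simp at this

theorem pv_join_step (sep a b : List Char) (r : List (List Char)) :
    PySem.Chars.join sep ((a ++ sep ++ b) :: r) = a ++ sep ++ PySem.Chars.join sep (b :: r) := by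
  cases r with
  | nil => simp [PySem.Chars.join_singleton]
  | cons c r' => simp [PySem.Chars.join_cons_cons]

theorem pv_foldl_join (ts : List String) (cur : String) :
    ts.foldl (fun c x => c ++ "\n" ++ x) cur = PySem.Str.join "\n" (cur :: ts) := by
  induction ts generalizing cur with
  | nil =>
    apply String.toList_inj.mp
    rw [PySem.Str.toList_join]
    simp [PySem.Chars.join_singleton]
  | cons x ts ih =>
    rw [List.foldl_cons, ih]
    apply String.toList_inj.mp
    rw [PySem.Str.toList_join, PySem.Str.toList_join]
    simp only [List.map_cons]
    rw [show (cur ++ "\n" ++ x).toList = cur.toList ++ ("\n" : String).toList ++ x.toList by simp]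
    rw [pv_join_step, PySem.Chars.join_cons_cons]

theorem pv_frame (ls : List String) (acc : List String) (cur : String) :
    pvAFin (ls.foldl pvAStep (acc, cur)) = acc ++ pvAFin (ls.foldl pvAStep ([], cur)) := by
  induction ls generalizing acc cur with
  | nil =>
    simp only [List.foldl_nil]
    unfold pvAFin
    split_ifs <;> simp
  | cons l ls ih =>
    simp only [List.foldl_cons]
    by_cases hd : pvIsDef l = true
    · by_cases hc : cur ≠ ""
      · simp only [pvAStep, hd, if_pos hc, if_true]
        rw [ih (acc ++ [cur]) l, ih ([] ++ [cur]) l]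
        simp
      · simp only [pvAStep, hd, if_neg hc, if_true]
        exact ih acc l
    · by_cases hc : cur ≠ ""
      · simp only [pvAStep, hd, if_pos hc, Bool.false_eq_true, if_false]
        exact ih acc _
      · simp only [pvAStep, hd, if_neg hc, Bool.false_eq_true, if_false]
        exact ih acc cur

theorem pv_active (ls : List String) (acc : List String) (cur : String) (hc : cur ≠ "") :
    pvAFin (ls.foldl pvAStep (acc, cur)) =
      acc ++ ((ls.takeWhile (fun x => !pvIsDef x)).foldl (fun c x => c ++ "\n" ++ x) cur) ::
        pvAcore (ls.dropWhile (fun x => !pvIsDef x)) := by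
  induction ls generalizing acc cur with
  | nil =>
    simp [pvAFin, pvAcore, if_pos hc]
  | cons l ls ih =>
    by_cases hd : pvIsDef l = true
    · simp only [List.foldl_cons, pvAStep, hd, if_pos hc, if_true]
      rw [pv_frame ls (acc ++ [cur]) l]
      have htw : (l :: ls).takeWhile (fun x => !pvIsDef x) = [] := by
        simp [hd]
      have hdw : (l :: ls).dropWhile (fun x => !pvIsDef x) = l :: ls := by
        simp [hd]
      rw [htw, hdw]
      have hcore : pvAcore (l :: ls) = pvAFin (ls.foldl pvAStep ([], l)) := by
        simp [pvAcore, List.foldl_cons, pvAStep, hd]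
      rw [hcore]
      simp
    · simp only [List.foldl_cons, pvAStep, hd, Bool.false_eq_true, if_false, if_pos hc]
      rw [ih acc (cur ++ "\n" ++ l) (pv_concat_ne_empty cur l)]
      have htw : (l :: ls).takeWhile (fun x => !pvIsDef x)
          = l :: ls.takeWhile (fun x => !pvIsDef x) := by
        simp [hd]
      have hdw : (l :: ls).dropWhile (fun x => !pvIsDef x)
          = ls.dropWhile (fun x => !pvIsDef x) := by
        simp [hd]
      rw [htw, hdw, List.foldl_cons]

theorem pv_A_blocks (ls : List String) : pvAcore ls = pvBlocks ls := by
  induction ls using pvBlocks.induct with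
  | case1 => simp [pvAcore, pvAFin, pvBlocks]
  | case2 l ls hd ih =>
    have hstep : pvAcore (l :: ls) = pvAFin (ls.foldl pvAStep ([], l)) := by
      simp [pvAcore, List.foldl_cons, pvAStep, hd]
    rw [hstep, pv_active ls [] l (pv_ne_empty_of_isDef hd), pv_foldl_join, ih]
    simp [pvBlocks, hd]
  | case3 l ls hd ih =>
    have hstep : pvAcore (l :: ls) = pvAcore ls := by
      simp [pvAcore, List.foldl_cons, pvAStep, hd]
    rw [hstep, ih]
    simp [pvBlocks, hd]

theorem pvBstarts_cons (s : Int) (l : String) (ls : List String) :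
    pvBstarts s (l :: ls) = (if pvIsDef l then [s] else []) ++ pvBstarts (s + 1) ls := by
  simp only [pvBstarts, PySem.List.enumerate_cons, List.filterMap_cons]
  cases hd : pvIsDef l <;> simp

theorem pv_shift (ls : List String) (s : Int) :
    pvBstarts (s + 1) ls = (pvBstarts s ls).map (· + 1) := by
  induction ls generalizing s with
  | nil => rfl
  | cons l ls ih =>
    rw [pvBstarts_cons (s + 1), pvBstarts_cons s, ih (s + 1), List.map_append]
    cases hd : pvIsDef l <;> simp

theorem pv_nonneg (ls : List String) (s x : Int) (hx : x ∈ pvBstarts s ls) : s ≤ x := by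
  induction ls generalizing s with
  | nil => simp [pvBstarts] at hx
  | cons l ls ih =>
    rw [pvBstarts_cons] at hx
    rcases List.mem_append.mp hx with h | h
    · cases hd : pvIsDef l <;> rw [hd] at h <;> simp at h
      omega
    · have := ih (s + 1) h; omega

theorem pv_empty (ls : List String) (h : pvBstarts 0 ls = []) :
    ls.takeWhile (fun x => !pvIsDef x) = ls := by
  induction ls with
  | nil => rfl
  | cons l ls ih =>
    rw [pvBstarts_cons, pv_shift] at h
    rcases List.append_eq_nil_iff.mp h with ⟨h1, h2⟩
    by_cases hd : pvIsDef l = true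
    · rw [hd] at h1; simp at h1
    · simp only [List.map_eq_nil_iff] at h2
      simp [hd, ih h2]

theorem pv_head (ls : List String) (a : Int) (S' : List Int)
    (h : pvBstarts 0 ls = a :: S') :
    ls.take a.toNat = ls.takeWhile (fun x => !pvIsDef x) ∧
    ls.drop a.toNat = ls.dropWhile (fun x => !pvIsDef x) := by
  induction ls generalizing a S' with
  | nil => simp [pvBstarts] at h
  | cons l ls ih =>
    rw [pvBstarts_cons, pv_shift] at h
    by_cases hd : pvIsDef l = true
    · rw [hd] at h
      simp only [if_true, List.singleton_append, List.cons.injEq] at h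
      obtain ⟨ha, _⟩ := h
      subst ha
      constructor
      · simp [hd]
      · simp [hd]
    · rw [if_neg (by simp [hd])] at h
      simp only [List.nil_append] at h
      cases hS : pvBstarts 0 ls with
      | nil => rw [hS] at h; simp at h
      | cons a0 S0 =>
        rw [hS] at h
        simp only [List.map_cons, List.cons.injEq] at h
        obtain ⟨ha, _⟩ := h
        have ha0 : 0 ≤ a0 := pv_nonneg ls 0 a0 (by rw [hS]; exact List.mem_cons_self ..)
        have htn : a.toNat = a0.toNat + 1 := by omega
        obtain ⟨ih1, ih2⟩ := ih a0 S0 hS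
        constructor
        · rw [htn]
          simp [hd, ih1]
        · rw [htn]
          simp [hd, ih2]

theorem pv_aux_shift (l : String) (full : List String) (ps : List (Int × Int))
    (h : ∀ p ∈ ps, 0 ≤ p.1 ∧ 0 ≤ p.2) :
    pvBcAux (l :: full) (ps.map (fun p => (p.1 + 1, p.2 + 1))) = pvBcAux full ps := by
  unfold pvBcAux
  rw [List.map_map]
  apply List.map_congr_left
  intro p hp
  obtain ⟨h1, h2⟩ := h p hp
  simp only [Function.comp]
  rw [PySem.List.slice_toNat _ (by omega) (by omega), PySem.List.slice_toNat _ h1 h2]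
  rw [show (p.1 + 1).toNat = p.1.toNat + 1 by omega]
  rw [show (p.2 + 1).toNat - (p.1.toNat + 1) = p.2.toNat - p.1.toNat by omega]
  rw [List.drop_succ_cons]

theorem pv_blocks_dropWhile (ls : List String) :
    pvBlocks (ls.dropWhile (fun x => !pvIsDef x)) = pvBlocks ls := by
  induction ls with
  | nil => rfl
  | cons l ls ih =>
    by_cases hd : pvIsDef l = true
    · simp [hd]
    · rw [show (l :: ls).dropWhile (fun x => !pvIsDef x) = ls.dropWhile (fun x => !pvIsDef x) by
        simp [List.dropWhile_cons, hd]]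
      rw [ih]
      simp [pvBlocks, hd]

theorem pvBc_drop (ls : List String) :
    pvBc ls = pvBcAux ls ((pvBstarts 0 ls).zip
      ((pvBstarts 0 ls).drop 1 ++ [(ls.length : Int)])) := by
  unfold pvBc
  rw [PySem.List.slice_from _ (by norm_num)]
  rfl

theorem pvBcAux_cons (full : List String) (p : Int × Int) (ps : List (Int × Int)) :
    pvBcAux full (p :: ps) =
      PySem.Str.join "\n" (PySem.List.slice full (some p.1) (some p.2)) :: pvBcAux full ps := rfl

theorem pv_B_blocks : ∀ n (ls : List String), ls.length ≤ n → pvBc ls = pvBlocks ls := by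
  intro n
  induction n with
  | zero =>
    intro ls hls
    have : ls = [] := List.eq_nil_of_length_eq_zero (Nat.le_zero.mp hls)
    subst this
    simp [pvBc, pvBcAux, pvBstarts, pvBlocks]
  | succ n ih =>
    intro ls hls
    cases ls with
    | nil => simp [pvBc, pvBcAux, pvBstarts, pvBlocks]
    | cons l ls =>
      have hlen : ls.length ≤ n := by simpa using hls
      have hcons : pvBstarts 0 (l :: ls) =
          (if pvIsDef l then [(0 : Int)] else []) ++ (pvBstarts 0 ls).map (· + 1) := by
        rw [pvBstarts_cons, pv_shift]
      have hlenInt : ((l :: ls).length : Int) = (ls.length : Int) + 1 := by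
        push_cast [List.length_cons]
        ring
      have hnn : ∀ p ∈ (pvBstarts 0 ls).zip ((pvBstarts 0 ls).drop 1 ++ [(ls.length : Int)]),
          0 ≤ p.1 ∧ 0 ≤ p.2 := by
        intro p hp
        obtain ⟨hp1, hp2⟩ := List.of_mem_zip hp
        refine ⟨pv_nonneg ls 0 p.1 hp1, ?_⟩
        rcases List.mem_append.mp hp2 with h | h
        · exact pv_nonneg ls 0 p.2 (List.mem_of_mem_drop h)
        · simp only [List.mem_singleton] at h
          omega
      have hBc : pvBcAux ls ((pvBstarts 0 ls).zip
          ((pvBstarts 0 ls).drop 1 ++ [(ls.length : Int)])) = pvBlocks ls := by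
        rw [← pvBc_drop]
        exact ih ls hlen
      rw [pvBc_drop, hcons, hlenInt]
      by_cases hd : pvIsDef l = true
      · simp only [hd, if_true, List.singleton_append]
        have hbl : pvBlocks (l :: ls) = PySem.Str.join "\n"
            (l :: ls.takeWhile (fun x => !pvIsDef x)) ::
              pvBlocks (ls.dropWhile (fun x => !pvIsDef x)) := by
          rw [pvBlocks]
          simp [hd]
        rw [hbl]
        cases hS : pvBstarts 0 ls with
        | nil =>
          simp only [List.map_nil]
          rw [show ([(0 : Int)].zip (List.drop 1 [(0 : Int)] ++ [(ls.length : Int) + 1]))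
              = [((0 : Int), (ls.length : Int) + 1)] from rfl]
          rw [pvBcAux_cons]
          rw [show pvBcAux (l :: ls) [] = [] from rfl]
          rw [PySem.List.slice_toNat _ (by norm_num) (by positivity)]
          rw [show (((ls.length : Int) + 1).toNat - (0 : Int).toNat) = ls.length + 1 by omega]
          simp only [Int.toNat_zero, List.drop_zero]
          rw [show ls.length + 1 = (l :: ls).length from rfl, List.take_length]
          have htw := pv_empty ls hS
          have hdw : ls.dropWhile (fun x => !pvIsDef x) = [] :=
            List.dropWhile_eq_nil_iff.mpr (List.takeWhile_eq_self_iff.mp htw)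
          rw [htw, hdw]
          rw [show pvBlocks ([] : List String) = [] from by simp [pvBlocks]]
        | cons a S' =>
          have ha : 0 ≤ a := pv_nonneg ls 0 a (by rw [hS]; exact List.mem_cons_self ..)
          rw [show List.drop 1 (0 :: (a :: S').map (· + 1)) = (a :: S').map (· + 1) from rfl]
          simp only [List.map_cons, List.cons_append]
          rw [List.zip_cons_cons]
          rw [show (S'.map (· + 1)) ++ [(ls.length : Int) + 1]
              = (S' ++ [(ls.length : Int)]).map (· + 1) by simp]
          rw [show ((a + 1) :: S'.map (· + 1)) = ((a :: S').map (· + 1)) by simp]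
          rw [List.zip_map, pvBcAux_cons]
          refine congrArg₂ List.cons ?_ ?_
          · -- head block
            rw [PySem.List.slice_toNat _ (by norm_num) (by omega)]
            simp only [Int.toNat_zero, Nat.sub_zero, List.drop_zero]
            rw [show (a + 1).toNat = a.toNat + 1 by omega, List.take_succ_cons]
            obtain ⟨h1, _⟩ := pv_head ls a S' hS
            rw [h1]
          · -- tail blocks
            have hps : ((a :: S').zip (S' ++ [(ls.length : Int)])).map (Prod.map (· + 1) (· + 1))
                = ((a :: S').zip (S' ++ [(ls.length : Int)])).map
                    (fun p => (p.1 + 1, p.2 + 1)) :=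
              List.map_congr_left (fun p _ => rfl)
            rw [hps, pv_aux_shift l ls _ (by
              intro p hp
              apply hnn
              rw [hS]
              simpa using hp)]
            rw [hS] at hBc
            rw [show List.drop 1 (a :: S') = S' from rfl] at hBc
            rw [hBc]
            exact (pv_blocks_dropWhile ls).symm
      · simp only [hd, Bool.false_eq_true, if_false, List.nil_append]
        rw [show List.drop 1 ((pvBstarts 0 ls).map (· + 1))
            = ((pvBstarts 0 ls).drop 1).map (· + 1) from (List.map_drop ..).symm]
        rw [show ((pvBstarts 0 ls).drop 1).map (· + 1) ++ [(ls.length : Int) + 1]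
            = ((pvBstarts 0 ls).drop 1 ++ [(ls.length : Int)]).map (· + 1) by simp]
        rw [List.zip_map]
        rw [show ((pvBstarts 0 ls).zip ((pvBstarts 0 ls).drop 1 ++ [(ls.length : Int)])).map
              (Prod.map (· + 1) (· + 1))
            = ((pvBstarts 0 ls).zip ((pvBstarts 0 ls).drop 1 ++ [(ls.length : Int)])).map
              (fun p => (p.1 + 1, p.2 + 1)) from List.map_congr_left (fun p _ => rfl)]
        rw [pv_aux_shift l ls _ hnn, hBc]
        rw [pvBlocks]
        simp [hd]

-- ===== VERDICT (by name: the statement is the Claim_ definition above) =====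
theorem parse_user_code_spec : Claim_equal_parse_user_code := by
  intro user_code _
  unfold Spec_parse_user_code
  show pvAcore ((PySem.Str.split? user_code "\n").getD []) =
    pvBc ((PySem.Str.split? user_code "\n").getD [])
  rw [pv_A_blocks, pv_B_blocks ((PySem.Str.split? user_code "\n").getD []).length _ (le_refl _)]
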